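-- pv_equiv track=rewrite | github.com/animeshokhade/dsa | scaler/SUBARRAY OR.py | solve
-- ===== SOURCE A (Python) =====
-- import math
--
-- def solve(A):
--     ans = 0
--     n = len(A)
--     maxElement = max(A)
--     iterations = int(math.log(maxElement, 2)) + 1
--
--     for i in range(iterations):
--         setBitTracker = 0
--         for j in range(n):
--             if (A[j] >> i) & 1:
--                 setBitTracker = j + 1
--             ans += (setBitTracker) * pow(2, i)
--
--     return ans % (pow(10, 9) + 7)
-- ===== SOURCE B (Python) =====
-- def solve(A):
--     n = len(A)
--     maxElement = max(A)
--     iterations = maxElement.bit_length()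
--     ans = 0
--     for i in range(iterations):
--         pos = [j for j in range(n) if (A[j] >> i) & 1]
--         for p, nxt in zip(pos, pos[1:] + [n]):
--             ans += (p + 1) * (nxt - p) << i
--     return ans % (10 ** 9 + 7)
-- ===== Notes on version B (the rewrite author's own statement) =====
-- stated objective: alternative
-- what changed: Replaced A's per-index tracker scan (for every bit, walk all n indices keeping a running last-set-position and adding tracker*2^i at each index) by a run-length/gap decomposition: per bit B collects the list of set positions and adds one closed-form contribution (p+1)*(nxt-p)<<i per set position, where nxt is the next set position (or n); no running tracker and no per-index additions.
import Mathlib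
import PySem

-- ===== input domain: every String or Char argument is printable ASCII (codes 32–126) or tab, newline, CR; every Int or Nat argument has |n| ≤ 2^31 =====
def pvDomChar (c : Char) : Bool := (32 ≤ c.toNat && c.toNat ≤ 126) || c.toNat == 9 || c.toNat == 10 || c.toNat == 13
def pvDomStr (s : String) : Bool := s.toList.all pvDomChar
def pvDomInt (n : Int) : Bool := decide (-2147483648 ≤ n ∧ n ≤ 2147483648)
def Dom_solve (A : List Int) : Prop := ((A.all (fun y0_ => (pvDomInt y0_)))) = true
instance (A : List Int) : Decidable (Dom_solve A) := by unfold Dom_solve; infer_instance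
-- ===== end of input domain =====

-- B drops A's per-index tracker scan: per bit it lists the set positions and adds one
-- closed-form gap contribution (p+1)*(nxt-p)*2^i per set position; alternative decomposition.

-- (a >> i) & 1, Python-exact (shared primitive helper of both ports)
def pyBit (a : Int) (i : Nat) : Int := PySem.Int.band (a >>> i) 1

-- ===== PORT A =====
-- body of A's inner loop: update setBitTracker, then ans += setBitTracker * 2^i
def stepA (A : List Int) (i : Nat) (p : Int × Int) (j : Nat) : Int × Int :=
  let st := if pyBit (A.getD j 0) i = 1 then ((j : Int) + 1) else p.1
  (st, p.2 + st * (2 : Int) ^ i)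

-- iterations = int(math.log(maxElement, 2)) + 1 : on the admitted inputs (1 ≤ maxElement ≤ 2^31,
-- guaranteed by Dom_solve ∧ Pre_solve) this equals maxElement.bit_length() = PySem.Int.bitLength
-- (checked against CPython); math.log itself is a float and not portable.
def solve (A : List Int) : Int :=
  match PySem.List.max? A (fun y => y) with
  | none => 0      -- Python: max of an empty list raises ValueError; excluded by Pre_solve
  | some m =>
    if m ≤ 0 then 0   -- Python: math.log(m, 2) raises ValueError; excluded by Pre_solve
    else
      let n := A.length
      let iterations := PySem.Int.bitLength m
      let ans := (List.range iterations).foldl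
        (fun ans i => ((List.range n).foldl (stepA A i) ((0 : Int), ans)).2) 0
      PySem.Int.mod ans (10 ^ 9 + 7)

-- ===== PORT B =====
-- B's inner loop: for p, nxt in zip(pos, pos[1:] + [n]): ans += (p+1)*(nxt-p) << i
def stepB (i : Nat) (s : Int) (pq : Int × Int) : Int :=
  s + ((pq.1 + 1) * (pq.2 - pq.1)) <<< i

def solve_alt (A : List Int) : Int :=
  match PySem.List.max? A (fun y => y) with
  | none => 0      -- Python: max of an empty list raises ValueError; excluded by Pre_solve
  | some m =>
    let n := A.length
    let iterations := PySem.Int.bitLength m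
    let ans := (List.range iterations).foldl
      (fun ans i =>
        let pos : List Int :=
          ((List.range n).filter (fun j => pyBit (A.getD j 0) i == 1)).map Int.ofNat
        (pos.zip (pos.drop 1 ++ [(n : Int)])).foldl (stepB i) ans) 0
    PySem.Int.mod ans (10 ^ 9 + 7)

-- ===== PRECONDITION & SPEC =====
-- Pre_ excludes exactly the inputs on which A raises: empty lists (ValueError from max)
-- and lists with no positive element (ValueError from math.log for a non-positive argument).
def Pre_solve (A : List Int) : Prop := A ≠ [] ∧ ∃ x ∈ A, 0 < x
instance (A : List Int) : Decidable (Pre_solve A) := by unfold Pre_solve; infer_instance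
def pvWitness_solve : List Int := [3, 5, 2]

def Spec_solve (A : List Int) (out : Int) : Prop := out = solve_alt A
instance (A : List Int) (out : Int) : Decidable (Spec_solve A out) := by unfold Spec_solve; infer_instance

-- ===== CLAIM (what is proved, stated in full; the proofs are below) =====
def Claim_equal_solve : Prop := ∀ (A : List Int), Dom_solve A → Pre_solve A → Spec_solve A (solve A)

-- ===== LEMMAS AND PROOFS =====

-- the tracker update at index j for bit i, and the tracker value after the first k indices
def upd (A : List Int) (i : Nat) (s : Int) (j : Nat) : Int :=
  if pyBit (A.getD j 0) i = 1 then ((j : Int) + 1) else s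

def T (A : List Int) (i k : Nat) : Int := (List.range k).foldl (upd A i) 0

lemma T_succ (A : List Int) (i k : Nat) : T A i (k + 1) = upd A i (T A i k) k := by
  simp [T, List.range_succ]

-- inner loop of A: one full scan of the array for bit i
lemma innerA (A : List Int) (i : Nat) :
    ∀ (n : Nat) (a : Int),
      (List.range n).foldl (stepA A i) ((0 : Int), a)
      = (T A i n, a + ∑ j ∈ Finset.range n, T A i (j + 1) * (2 : Int) ^ i) := by
  intro n a
  induction n with
  | zero => simp [T]
  | succ n ih =>
    rw [List.range_succ, List.foldl_append, ih, List.foldl_cons, List.foldl_nil]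
    rw [stepA, Finset.sum_range_succ, T_succ, upd]
    split <;> exact Prod.ext rfl (by ring)

-- closed-form gap sum over a position list with terminal t
def gaps : List Int → Int → Int
  | [], _ => 0
  | [p], t => (p + 1) * (t - p)
  | p :: q :: r, t => (p + 1) * (q - p) + gaps (q :: r) t

-- last recorded position + 1 (the tracker value a position list represents)
def lastD (P : List Int) : Int := (P.getLast?).elim 0 (fun p => p + 1)

-- B's zip fold computes the gap sum
lemma zipfold_eq_gaps (i : Nat) :
    ∀ (P : List Int) (t a : Int),
      ((P.zip (P.drop 1 ++ [t])).foldl (stepB i) a) = a + gaps P t * (2 : Int) ^ i := by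
  intro P
  induction P with
  | nil => simp [gaps]
  | cons p P ih =>
    intro t a
    cases P with
    | nil => simp [gaps, stepB, Int.shiftLeft_eq]
    | cons q r =>
      show ((p, q) :: ((q :: r).zip ((r : List Int) ++ [t]))).foldl (stepB i) a = _
      rw [List.foldl_cons]
      simp only [List.drop_succ_cons, List.drop_zero] at ih
      rw [ih t (stepB i a (p, q))]
      simp only [stepB, gaps, Int.shiftLeft_eq]
      ring

lemma gaps_snoc (m t : Int) : ∀ (P : List Int),
    gaps (P ++ [m]) t = gaps P m + (m + 1) * (t - m) := by
  intro P
  induction P with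
  | nil => simp [gaps]
  | cons p P ih =>
    cases P with
    | nil => simp [gaps]
    | cons q r =>
      show gaps (p :: q :: (r ++ [m])) t = _
      rw [gaps, ← List.cons_append, ih, gaps]
      ring

lemma gaps_term (t t' : Int) : ∀ (P : List Int),
    gaps P t' = gaps P t + (t' - t) * lastD P := by
  intro P
  induction P with
  | nil => simp [gaps, lastD]
  | cons p P ih =>
    cases P with
    | nil => simp [gaps, lastD]; ring
    | cons q r =>
      rw [gaps, gaps, ih]
      have : lastD (p :: q :: r) = lastD (q :: r) := by
        simp [lastD, List.getLast?_cons_cons]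
      rw [this]; ring

lemma lastD_snoc (P : List Int) (m : Int) : lastD (P ++ [m]) = m + 1 := by
  simp [lastD]

-- B's position list for bit i over the first n indices
def Pos (A : List Int) (i n : Nat) : List Int :=
  ((List.range n).filter (fun j => pyBit (A.getD j 0) i == 1)).map Int.ofNat

-- main invariant: the tracker equals the last recorded position + 1, and the
-- tracker sum equals the gap sum of the position list
lemma tracker_eq_gaps (A : List Int) (i : Nat) : ∀ (n : Nat),
    T A i n = lastD (Pos A i n) ∧
    (∑ j ∈ Finset.range n, T A i (j + 1)) = gaps (Pos A i n) (n : Int) := by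
  intro n
  induction n with
  | zero => simp [T, Pos, lastD, gaps]
  | succ n ih =>
    obtain ⟨ih1, ih2⟩ := ih
    cases hb : pyBit (A.getD n 0) i == 1 with
    | true =>
      have hP : Pos A i (n + 1) = Pos A i n ++ [(n : Int)] := by
        unfold Pos
        rw [List.range_succ, List.filter_append, List.map_append]
        simp only [List.filter_cons, List.filter_nil, hb]
        simp
      have hT : T A i (n + 1) = (n : Int) + 1 := by
        rw [T_succ, upd, if_pos (by simpa using hb)]
      constructor
      · rw [hT, hP, lastD_snoc]
      · rw [Finset.sum_range_succ, ih2, hT, hP, gaps_snoc]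
        push_cast; ring
    | false =>
      have hP : Pos A i (n + 1) = Pos A i n := by
        unfold Pos
        rw [List.range_succ, List.filter_append]
        simp only [List.filter_cons, List.filter_nil, hb]
        simp
      have hT : T A i (n + 1) = T A i n := by
        rw [T_succ, upd, if_neg (by simpa using hb)]
      constructor
      · rw [hT, hP, ih1]
      · rw [Finset.sum_range_succ, ih2, hT, hP, ih1]
        push_cast
        rw [gaps_term (n : Int) ((n : Int) + 1) (Pos A i n)]
        ring

-- max over a nonempty list with a positive element is positive
lemma max_pos (A : List Int) (m : Int) (hm : PySem.List.max? A (fun y => y) = some m)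
    (x : Int) (hx : x ∈ A) (hpos : 0 < x) : 0 < m := by
  have := PySem.List.max?_isMax hm x hx
  simpa using lt_of_lt_of_le hpos this

-- ===== VERDICT (by name: the statement is the Claim_ definition above) =====
theorem solve_spec : Claim_equal_solve := by
  intro A _ hPre
  obtain ⟨hne, x, hx, hpos⟩ := hPre
  unfold Spec_solve solve solve_alt
  cases hmax : PySem.List.max? A (fun y => y) with
  | none =>
    exact absurd ((PySem.List.max?_eq_none_iff A (fun y => y)).mp hmax) hne
  | some m =>
    have hm : 0 < m := max_pos A m hmax x hx hpos
    simp only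
    rw [if_neg (by omega)]
    congr 1
    apply PySem.List.foldl_congr_mem
    intro ans i _
    show (_ : Int × Int).2 = _
    have hPdef : ((List.range A.length).filter
        (fun j => pyBit (A.getD j 0) i == 1)).map Int.ofNat = Pos A i A.length := rfl
    rw [innerA A i A.length ans, hPdef,
      zipfold_eq_gaps i (Pos A i A.length) (A.length : Int) ans]
    have h := (tracker_eq_gaps A i A.length).2
    rw [← Finset.sum_mul, h]
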